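-- pv_equiv track=rewrite | github.com/chenweigao/_code | interview/niuniu.py | solution
-- ===== SOURCE A (Python) =====
-- def solution(work, ability):
--     res = []
--     for i in range(len(ability)):
--         temp = 0
--         for k, v in work.items():
--             if ability[i] >= k:
--                 temp = max(temp, v)
--         res.append(temp)
--     return res
-- ===== SOURCE B (Python) =====
-- from bisect import bisect_right
--
-- def solution(work, ability):
--     items = sorted(work.items(), key=lambda kv: kv[0])
--     keys = [k for k, _ in items]
--     pm = [0]
--     cur = 0
--     for _, v in items:
--         cur = max(cur, v)
--         pm.append(cur)
--     return [pm[bisect_right(keys, a)] for a in ability]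
-- ===== Notes on version B (the rewrite author's own statement) =====
-- stated objective: faster
-- what changed: Instead of scanning the whole work dict for every ability, B sorts the work items by key once, builds a running prefix-max of the values, and answers each ability query with one bisect_right binary search into the sorted keys.
import Mathlib
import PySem

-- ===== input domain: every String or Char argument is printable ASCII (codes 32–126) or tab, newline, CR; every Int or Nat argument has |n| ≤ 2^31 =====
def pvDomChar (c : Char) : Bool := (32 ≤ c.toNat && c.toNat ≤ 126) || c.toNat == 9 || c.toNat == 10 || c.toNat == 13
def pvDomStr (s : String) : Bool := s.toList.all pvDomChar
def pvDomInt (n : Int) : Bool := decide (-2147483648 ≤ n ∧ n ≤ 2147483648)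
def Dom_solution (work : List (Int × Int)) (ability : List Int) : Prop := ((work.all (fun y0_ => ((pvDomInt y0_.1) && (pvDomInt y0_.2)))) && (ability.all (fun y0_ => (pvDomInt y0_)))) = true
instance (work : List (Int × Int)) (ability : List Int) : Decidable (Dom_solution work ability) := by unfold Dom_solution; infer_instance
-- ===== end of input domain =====

-- B replaces A's O(n·m) double scan by sort + running-prefix-max + binary search, O((n+m) log n); return value only.

-- ===== PORT A =====
-- inner loop: for k, v in work.items(): if ability[i] >= k: temp = max(temp, v)
def solutionInner (work : List (Int × Int)) (a : Int) : Int :=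
  work.foldl (fun temp kv => if a ≥ kv.1 then max temp kv.2 else temp) 0

def solution (work : List (Int × Int)) (ability : List Int) : List Int :=
  (PySem.List.pyRange 0 (PySem.List.len ability)).foldl
    (fun res i => res ++ [solutionInner work (PySem.List.pyGetD ability i 0)]) []

-- ===== PORT B =====
-- the loop 'cur = max(cur, v); pm.append(cur)' building the prefix-max list pm (pm[0] = 0)
def prefixMax : Int → List Int → List Int
  | cur, [] => [cur]
  | cur, v :: rest => cur :: prefixMax (max cur v) rest

def solution_alt (work : List (Int × Int)) (ability : List Int) : List Int :=
  let items := PySem.List.sorted work (fun kv => kv.1)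
  let keys := items.map (fun kv => kv.1)
  let pm := prefixMax 0 (items.map (fun kv => kv.2))
  ability.map (fun a => pm.getD (PySem.List.bisectRight keys a) 0)

-- ===== PRECONDITION & SPEC =====
def Spec_solution (work : List (Int × Int)) (ability : List Int) (out : List Int) : Prop := out = solution_alt work ability
instance (work : List (Int × Int)) (ability : List Int) (out : List Int) : Decidable (Spec_solution work ability out) := by unfold Spec_solution; infer_instance

-- ===== CLAIM (what is proved, stated in full; the proofs are below) =====
def Claim_equal_solution : Prop := ∀ (work : List (Int × Int)) (ability : List Int), Dom_solution work ability → Spec_solution work ability (solution work ability)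

-- ===== LEMMAS AND PROOFS =====

-- A's inner loop is the max (with 0) of the values whose key is ≤ a
theorem solutionInner_eq_foldl_max (l : List (Int × Int)) (a : Int) (t : Int) :
    l.foldl (fun temp kv => if a ≥ kv.1 then max temp kv.2 else temp) t
      = List.foldl max t ((l.filter (fun kv => kv.1 ≤ a)).map (fun kv => kv.2)) := by
  induction l generalizing t with
  | nil => rfl
  | cons x xs ih =>
    by_cases h : x.1 ≤ a
    · simp [h, ge_iff_le, ih]
    · simp [h, ge_iff_le, ih]

-- filtering a downward-closed predicate out of a sorted list takes a prefix
theorem filter_eq_take_countP {α : Type} (p : α → Bool) (l : List α)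
    (h : l.Pairwise (fun x y => p y = true → p x = true)) :
    l.filter p = l.take (l.countP p) := by
  induction l with
  | nil => rfl
  | cons x xs ih =>
    rcases List.pairwise_cons.mp h with ⟨hx, hxs⟩
    by_cases hp : p x = true
    · simp [hp, ih hxs]
    · have hall : ∀ y ∈ xs, ¬ p y = true := fun y hy hpy => hp (hx y hy hpy)
      simp [hp, List.countP_eq_zero.mpr hall, List.filter_eq_nil_iff.mpr hall]

-- pm[c] is the running max of the first c values
theorem prefixMax_getD (vs : List Int) (cur : Int) (c : Nat) (hc : c ≤ vs.length) :
    (prefixMax cur vs).getD c 0 = List.foldl max cur (vs.take c) := by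
  induction vs generalizing cur c with
  | nil =>
    have : c = 0 := Nat.le_zero.mp hc
    subst this
    simp [prefixMax]
  | cons v rest ih =>
    cases c with
    | zero => simp [prefixMax]
    | succ c =>
      simp only [prefixMax, List.getD_cons_succ, List.take_succ_cons, List.foldl_cons]
      exact ih (max cur v) c (Nat.le_of_succ_le_succ hc)

-- bisect_right into the sorted key list counts the pairs with key ≤ a
theorem bisectRight_eq_countP (items : List (Int × Int)) (a : Int)
    (hs : (items.map (fun kv => kv.1)).Pairwise (fun x y => x ≤ y)) :
    PySem.List.bisectRight (items.map (fun kv => kv.1)) a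
      = items.countP (fun kv => kv.1 ≤ a) := by
  set keys := items.map (fun kv => kv.1) with hk
  obtain ⟨hle, hlt, hgt⟩ := PySem.List.bisectRight_spec keys a hs
  set c := PySem.List.bisectRight keys a with hc
  have h1 : (keys.take c).countP (fun k => decide (k ≤ a)) = c := by
    rw [List.countP_eq_length.mpr, List.length_take_of_le hle]
    intro k hkmem
    obtain ⟨j, hj, rfl⟩ := List.mem_iff_getElem.mp hkmem
    have hlen := List.length_take_of_le (l := keys) hle
    simp only [List.getElem_take]
    exact decide_eq_true (hlt j (by omega) (by omega))
  have h2 : (keys.drop c).countP (fun k => decide (k ≤ a)) = 0 := by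
    rw [List.countP_eq_zero]
    intro k hkmem
    obtain ⟨j, hj, rfl⟩ := List.mem_iff_getElem.mp hkmem
    have hj' : c + j < keys.length := by
      have := hj
      simp only [List.length_drop] at this
      omega
    simp only [List.getElem_drop]
    have := hgt (c + j) hj' (by omega)
    simp only [decide_eq_true_eq]
    omega
  have : keys.countP (fun k => decide (k ≤ a)) = c := by
    conv_lhs => rw [← List.take_append_drop c keys]
    rw [List.countP_append, h1, h2]
    omega
  rw [← this, hk, List.countP_map]
  rfl

-- per-ability agreement of the two computations
theorem inner_eq_alt (work : List (Int × Int)) (a : Int) :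
    solutionInner work a
      = (prefixMax 0 ((PySem.List.sorted work (fun kv => kv.1)).map (fun kv => kv.2))).getD
          (PySem.List.bisectRight ((PySem.List.sorted work (fun kv => kv.1)).map (fun kv => kv.1)) a) 0 := by
  set items := PySem.List.sorted work (fun kv => kv.1) with hitems
  have hperm : items.Perm work := PySem.List.sorted_perm work _ false
  have hpair : (items.map (fun kv => kv.1)).Pairwise (fun x y => x ≤ y) :=
    PySem.List.sorted_map_key_pairwise work (fun kv => kv.1)
  have hpairDown : items.Pairwise (fun x y => (decide (y.1 ≤ a)) = true → (decide (x.1 ≤ a)) = true) := by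
    have := (List.pairwise_map.mp hpair)
    exact this.imp (by intro x y hxy; simp only [decide_eq_true_eq]; omega)
  set c := PySem.List.bisectRight (items.map (fun kv => kv.1)) a with hcdef
  have hcount : c = items.countP (fun kv => kv.1 ≤ a) := bisectRight_eq_countP items a hpair
  have hclen : c ≤ items.length := by rw [hcount]; exact List.countP_le_length
  rw [solutionInner, solutionInner_eq_foldl_max]
  have hfperm : ((work.filter (fun kv => kv.1 ≤ a)).map (fun kv => kv.2)).Perm
      ((items.filter (fun kv => kv.1 ≤ a)).map (fun kv => kv.2)) :=
    ((hperm.symm.filter _).map _)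
  rw [hfperm.foldl_eq 0]
  rw [filter_eq_take_countP _ items hpairDown, ← hcount]
  rw [prefixMax_getD _ 0 c (by simpa using hclen), List.map_take]

-- ===== VERDICT (by name: the statement is the Claim_ definition above) =====
theorem solution_spec : Claim_equal_solution := by
  intro work ability _
  show solution work ability = solution_alt work ability
  have hmap : solution work ability = ability.map (fun a => solutionInner work a) := by
    rw [solution, PySem.List.foldl_append_singleton_eq_map, List.nil_append]
    have h2 := congrArg (List.map (fun a => solutionInner work a))
      (PySem.List.map_pyGetD_pyRange_zero ability 0)
    simpa [List.map_map, Function.comp] using h2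
  rw [hmap, solution_alt]
  exact List.map_congr_left (fun a _ => inner_eq_alt work a)
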